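-- pv_equiv track=rewrite | github.com/ArcherSore/MaaNOP | agent/common.py | _extract_number_like_tokens
-- ===== SOURCE A (Python) =====
-- SERVER_NUMBER_CHARS = set("0123456789|")
--
-- def _extract_number_like_tokens(text: str) -> list[str]:
--     numbers = []
--     current = []
--
--     for ch in text:
--         if ch in SERVER_NUMBER_CHARS:
--             current.append(ch)
--         else:
--             if current:
--                 numbers.append("".join(current))
--                 current = []
--
--     if current:
--         numbers.append("".join(current))
--
--     return numbers
-- ===== SOURCE B (Python) =====
-- SERVER_NUMBER_CHARS = set("0123456789|")
--
--
-- def _extract_number_like_tokens(text: str) -> list[str]: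
--     # Mask every non-number-like character to a space, then let str.split()
--     # return the maximal runs (it drops empty pieces).
--     masked = "".join(ch if ch in SERVER_NUMBER_CHARS else " " for ch in text)
--     return masked.split()
-- ===== Notes on version B (the rewrite author's own statement) =====
-- stated objective: idiomatic
-- what changed: Replaces the stateful run-accumulation loop (current buffer flushed on separators and at the end) with a mask pass that maps non-number characters to spaces followed by a single str.split().
import Mathlib
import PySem

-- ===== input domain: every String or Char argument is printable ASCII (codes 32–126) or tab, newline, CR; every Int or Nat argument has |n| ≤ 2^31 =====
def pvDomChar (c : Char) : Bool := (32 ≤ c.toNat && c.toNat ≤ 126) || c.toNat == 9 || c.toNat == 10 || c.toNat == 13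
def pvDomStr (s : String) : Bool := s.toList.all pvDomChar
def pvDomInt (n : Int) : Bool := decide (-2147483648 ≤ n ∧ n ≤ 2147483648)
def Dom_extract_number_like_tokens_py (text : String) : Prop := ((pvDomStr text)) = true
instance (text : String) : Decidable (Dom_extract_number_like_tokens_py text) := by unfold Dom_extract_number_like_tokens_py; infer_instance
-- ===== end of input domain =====

-- B replaces A's stateful run-accumulation loop with a mask-to-space pass followed by str.split(); same return value, idiomatic decomposition.

-- ===== PORT A =====
-- SERVER_NUMBER_CHARS = set("0123456789|")
def pvNumberChars : PySem.Set Char := PySem.Set.ofList "0123456789|".toList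

-- the for-loop over text plus the trailing flush; state = (numbers, current)
def pvLoopA : List Char → List String → List Char → List String
  | [], numbers, current =>
      if current.isEmpty then numbers else numbers ++ [String.ofList current]
  | ch :: rest, numbers, current =>
      if PySem.Set.contains pvNumberChars ch then
        pvLoopA rest numbers (current ++ [ch])
      else if current.isEmpty then
        pvLoopA rest numbers current
      else
        pvLoopA rest (numbers ++ [String.ofList current]) []

def extract_number_like_tokens_py (text : String) : List String :=
  pvLoopA text.toList [] []

-- ===== PORT B =====
-- ch if ch in SERVER_NUMBER_CHARS else " "
def pvMask (ch : Char) : Char :=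
  if PySem.Set.contains pvNumberChars ch then ch else ' '

def extract_number_like_tokens_py_alt (text : String) : List String :=
  PySem.Str.split₀ (String.ofList (text.toList.map pvMask))

-- ===== PRECONDITION & SPEC =====
def Spec_extract_number_like_tokens_py (text : String) (out : List String) : Prop := out = extract_number_like_tokens_py_alt text
instance (text : String) (out : List String) : Decidable (Spec_extract_number_like_tokens_py text out) := by unfold Spec_extract_number_like_tokens_py; infer_instance

-- ===== CLAIM (what is proved, stated in full; the proofs are below) =====
def Claim_equal_extract_number_like_tokens_py : Prop := ∀ (text : String), Dom_extract_number_like_tokens_py text → Spec_extract_number_like_tokens_py text (extract_number_like_tokens_py text)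

-- ===== LEMMAS AND PROOFS =====

-- every number-like character is non-whitespace
lemma pvNumber_not_space (ch : Char) (h : ch ∈ pvNumberChars) :
    PySem.Chars.isspace ch = false := by
  have hm : ch ∈ "0123456789|".toList := by
    simpa [pvNumberChars, PySem.Set.mem_ofList] using h
  have hl : "0123456789|".toList = ['0','1','2','3','4','5','6','7','8','9','|'] := rfl
  rw [hl] at hm
  fin_cases hm <;> decide

-- numbers accumulates on the left
lemma pvLoopA_append : ∀ (cs : List Char) (numbers : List String) (current : List Char),
    pvLoopA cs numbers current = numbers ++ pvLoopA cs [] current := by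
  intro cs
  induction cs with
  | nil => intro numbers current; by_cases h : current.isEmpty <;> simp [pvLoopA, h]
  | cons ch rest ih =>
      intro numbers current
      by_cases h : ch ∈ pvNumberChars
      · simp [pvLoopA, h, ih numbers (current ++ [ch])]
      · by_cases hc : current.isEmpty
        · simp [pvLoopA, h, hc, ih numbers current]
        · simp only [pvLoopA]
          rw [ih (numbers ++ [String.ofList current]) [], ih ([] ++ [String.ofList current]) []]
          simp [h, hc]

-- split₀'s worker on the masked characters computes A's loop
lemma pvGo_eq : ∀ (cs cur : List Char) (acc : List (List Char)),
    (PySem.Chars.split₀.go (cs.map pvMask) cur acc).map String.ofList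
      = acc.reverse.map String.ofList ++ pvLoopA cs [] cur.reverse := by
  intro cs
  induction cs with
  | nil =>
      intro cur acc
      by_cases hc : cur.isEmpty
      · have : cur = [] := by simpa [List.isEmpty_iff] using hc
        simp [this, PySem.Chars.split₀.go, pvLoopA]
      · have hcr : (cur.reverse).isEmpty = false := by
          simp [List.isEmpty_iff] at *; simpa using hc
        simp [PySem.Chars.split₀.go, pvLoopA, hc, hcr]
  | cons ch rest ih =>
      intro cur acc
      by_cases h : ch ∈ pvNumberChars
      · have hmask : pvMask ch = ch := by simp [pvMask, h]
        have hsp : PySem.Chars.isspace ch = false := pvNumber_not_space ch h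
        simp [PySem.Chars.split₀.go, hmask, hsp, pvLoopA, h, ih (ch :: cur) acc]
      · have hmask : pvMask ch = ' ' := by simp [pvMask, h]
        have hsp : PySem.Chars.isspace ' ' = true := by decide
        by_cases hc : cur.isEmpty
        · have : cur = [] := by simpa [List.isEmpty_iff] using hc
          simp [PySem.Chars.split₀.go, hmask, hsp, this, pvLoopA, h, ih [] acc]
        · have hcr : (cur.reverse).isEmpty = false := by
            simp [List.isEmpty_iff] at *; simpa using hc
          simp only [List.map_cons, PySem.Chars.split₀.go, hmask, hsp, if_pos, hc,
            Bool.false_eq_true, if_false]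
          rw [ih [] (cur.reverse :: acc)]
          simp [pvLoopA, h, hcr, pvLoopA_append rest [String.ofList cur.reverse] []]

-- ===== VERDICT (by name: the statement is the Claim_ definition above) =====
theorem extract_number_like_tokens_py_spec : Claim_equal_extract_number_like_tokens_py := by
  intro text _
  unfold Spec_extract_number_like_tokens_py extract_number_like_tokens_py
    extract_number_like_tokens_py_alt
  rw [PySem.Str.split₀]
  have := pvGo_eq text.toList [] []
  simp [PySem.Chars.split₀] at this ⊢
  simpa using this.symm
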